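-- pv_equiv track=rewrite | github.com/padas-lab-de/tpdl24-comparative-analysis-user-interactions-in-digital-libraries | analysis/session_analysis.py | categorize_session
-- ===== SOURCE A (Python) =====
-- def categorize_session(session):
--     actions = session["actions"]
--     iterative = False
--     opportunistic = False
--     unsystematic = False
--     multi_tactical = False
--
--     search_terms = []
--     for action in actions:
--         if action["action_type"] == "extraction" and action["action_label"].startswith(
--             "searchterm"
--         ):
--             search_terms.append(action["params"])
--             if len(search_terms) > 1:
--                 iterative = True
--
--     document_views = set()
--     for action in actions:
--         if action["action_type"] == "extraction" and action["action_label"] == "docid":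
--             if action["params"] not in document_views:
--                 document_views.add(action["params"])
--             else:
--                 opportunistic = True
--
--     action_types = set(a["action_type"] for a in actions)
--     if len(action_types) > 1:
--         multi_tactical = True
--
--     previous_type = None
--     for action in actions:
--         if previous_type and action["action_type"] != previous_type:
--             unsystematic = True
--             break
--         previous_type = action["action_type"]
--
--     is_exploratory = iterative and opportunistic and unsystematic and multi_tactical
--     return "Exploratory" if is_exploratory else "Lookup"
-- ===== SOURCE B (Python) =====
-- def categorize_session(session):
--     n_search_terms = 0
--     iterative = False
--     opportunistic = False
--     unsystematic = False
--     seen_docids = set()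
--     action_types = set()
--     previous_type = None
--     for action in session["actions"]:
--         t = action["action_type"]
--         if t == "extraction":
--             label = action["action_label"]
--             if label.startswith("searchterm"):
--                 n_search_terms += 1
--                 if n_search_terms > 1:
--                     iterative = True
--             if label == "docid":
--                 p = action["params"]
--                 if p in seen_docids:
--                     opportunistic = True
--                 else:
--                     seen_docids.add(p)
--         if previous_type and t != previous_type:
--             unsystematic = True
--         action_types.add(t)
--         previous_type = t
--     multi_tactical = len(action_types) > 1
--     if iterative and opportunistic and unsystematic and multi_tactical:
--         return "Exploratory"
--     return "Lookup"
-- ===== Notes on version B (the rewrite author's own statement) =====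
-- stated objective: alternative
-- what changed: B replaces A's four independent passes over actions (search-term list, docid set, set-comprehension of types, previous-type scan) with one fused loop that maintains a search-term counter, the seen-docid set, the action-type set and the previous type, deriving the four flags in a single traversal.
import Mathlib
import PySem

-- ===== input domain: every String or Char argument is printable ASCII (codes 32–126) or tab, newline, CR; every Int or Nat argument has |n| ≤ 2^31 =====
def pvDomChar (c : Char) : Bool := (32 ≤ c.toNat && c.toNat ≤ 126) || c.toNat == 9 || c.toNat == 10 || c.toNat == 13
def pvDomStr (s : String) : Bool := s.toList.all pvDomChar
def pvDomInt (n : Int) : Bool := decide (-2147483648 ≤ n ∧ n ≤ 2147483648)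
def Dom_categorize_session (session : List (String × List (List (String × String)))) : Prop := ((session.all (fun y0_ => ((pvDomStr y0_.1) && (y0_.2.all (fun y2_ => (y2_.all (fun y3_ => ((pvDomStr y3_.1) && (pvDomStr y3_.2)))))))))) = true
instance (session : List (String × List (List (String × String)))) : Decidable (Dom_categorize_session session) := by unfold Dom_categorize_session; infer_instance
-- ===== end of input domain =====

-- B fuses A's four independent passes over `actions` into a single loop that maintains a
-- search-term counter, the seen-docid set, the action-type set and the previous type (objective:
-- alternative decomposition — one pass instead of four, a counter instead of the term list).
-- Where the Python would raise KeyError (missing dict key), the ports read a "" / [] default;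
-- Pre_ excludes exactly those inputs.

-- shared accessor: d[k] on a string-valued dict, with "" where Python raises KeyError (excluded by Pre_)
def pvGetS (a : List (String × String)) (k : String) : String :=
  ((PySem.Dict.mk a).get? k).getD ""

-- ===== PORT A =====
-- loop 1: search_terms list and `iterative`
def aSearchLoop : List (List (String × String)) → List String × Bool → List String × Bool
  | [], s => s
  | action :: rest, (terms, iter) =>
    if pvGetS action "action_type" = "extraction" ∧
        PySem.Str.startswith (pvGetS action "action_label") "searchterm" = true then
      let terms' := terms ++ [pvGetS action "params"]
      aSearchLoop rest (terms', if terms'.length > 1 then true else iter)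
    else
      aSearchLoop rest (terms, iter)

-- loop 2: document_views set and `opportunistic`
def aDocLoop : List (List (String × String)) → PySem.Set String × Bool → PySem.Set String × Bool
  | [], s => s
  | action :: rest, (views, opp) =>
    if pvGetS action "action_type" = "extraction" ∧ pvGetS action "action_label" = "docid" then
      if pvGetS action "params" ∉ views then
        aDocLoop rest (PySem.Set.add views (pvGetS action "params"), opp)
      else
        aDocLoop rest (views, true)
    else
      aDocLoop rest (views, opp)

-- loop 3: `unsystematic` with break; previous_type None is modelled as "" (both are falsy and
-- "" is only compared when truthy, so the two coincide)
def aUnsysLoop : List (List (String × String)) → String → Bool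
  | [], _ => false
  | action :: rest, prev =>
    if prev ≠ "" ∧ pvGetS action "action_type" ≠ prev then true
    else aUnsysLoop rest (pvGetS action "action_type")

def categorize_session (session : List (String × List (List (String × String)))) : String :=
  let actions := ((PySem.Dict.mk session).get? "actions").getD []
  let iterative := (aSearchLoop actions ([], false)).2
  let opportunistic := (aDocLoop actions ([], false)).2
  let action_types : PySem.Set String :=
    PySem.Set.ofList (actions.map (fun a => pvGetS a "action_type"))
  let multi_tactical := decide (action_types.length > 1)
  let unsystematic := aUnsysLoop actions ""
  if iterative && opportunistic && unsystematic && multi_tactical then "Exploratory" else "Lookup"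

-- ===== PORT B =====
-- counter/`iterative` update for one action
def bTermStep (action : List (String × String)) (n : Int) (iter : Bool) : Int × Bool :=
  if pvGetS action "action_type" = "extraction" ∧
      PySem.Str.startswith (pvGetS action "action_label") "searchterm" = true then
    (n + 1, if n + 1 > 1 then true else iter)
  else (n, iter)

-- seen-docids/`opportunistic` update for one action
def bDocStep (action : List (String × String)) (seen : PySem.Set String) (opp : Bool) :
    PySem.Set String × Bool :=
  if pvGetS action "action_type" = "extraction" ∧ pvGetS action "action_label" = "docid" then
    if pvGetS action "params" ∈ seen then (seen, true)
    else (PySem.Set.add seen (pvGetS action "params"), opp)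
  else (seen, opp)

-- the single fused loop: state (n_search_terms, iterative, seen_docids, opportunistic,
-- action_types, previous_type, unsystematic); previous_type None is modelled as ""
def bLoop : List (List (String × String)) → Int → Bool → PySem.Set String → Bool →
    PySem.Set String → String → Bool →
    Int × Bool × PySem.Set String × Bool × PySem.Set String × String × Bool
  | [], n, iter, seen, opp, types, prev, unsys => (n, iter, seen, opp, types, prev, unsys)
  | action :: rest, n, iter, seen, opp, types, prev, unsys =>
    let t := pvGetS action "action_type"
    let unsys' := if prev ≠ "" ∧ t ≠ prev then true else unsys
    bLoop rest (bTermStep action n iter).1 (bTermStep action n iter).2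
      (bDocStep action seen opp).1 (bDocStep action seen opp).2
      (PySem.Set.add types t) t unsys'

def categorize_session_alt (session : List (String × List (List (String × String)))) : String :=
  let r := bLoop (((PySem.Dict.mk session).get? "actions").getD []) 0 false [] false [] "" false
  let multi_tactical := decide (r.2.2.2.2.1.length > 1)
  if r.2.1 && r.2.2.2.1 && r.2.2.2.2.2.2 && multi_tactical then "Exploratory" else "Lookup"

-- ===== PRECONDITION & SPEC =====
-- Pre_ = exactly the inputs where the Python A returns (no KeyError): the "actions" key exists,
-- every action has "action_type", an extraction action has "action_label", and "params" exists
-- when that label starts with "searchterm" or equals "docid" (the only places A reads it).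
def Pre_categorize_session (session : List (String × List (List (String × String)))) : Prop :=
  ((PySem.Dict.mk session).get? "actions").isSome = true ∧
  ∀ a ∈ ((PySem.Dict.mk session).get? "actions").getD [],
    ((PySem.Dict.mk a).get? "action_type").isSome = true ∧
    (pvGetS a "action_type" = "extraction" →
      ((PySem.Dict.mk a).get? "action_label").isSome = true ∧
      ((PySem.Str.startswith (pvGetS a "action_label") "searchterm" = true ∨
          pvGetS a "action_label" = "docid") →
        ((PySem.Dict.mk a).get? "params").isSome = true))
instance (session : List (String × List (List (String × String)))) : Decidable (Pre_categorize_session session) := by unfold Pre_categorize_session; infer_instance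

def pvWitness_categorize_session : (List (String × List (List (String × String)))) :=
  [("actions", [[("action_type", "search")], [("action_type", "view")]])]

def Spec_categorize_session (session : List (String × List (List (String × String)))) (out : String) : Prop := out = categorize_session_alt session
instance (session : List (String × List (List (String × String)))) (out : String) : Decidable (Spec_categorize_session session out) := by unfold Spec_categorize_session; infer_instance

-- ===== CLAIM (what is proved, stated in full; the proofs are below) =====
def Claim_equal_categorize_session : Prop := ∀ (session : List (String × List (List (String × String)))), Dom_categorize_session session → Pre_categorize_session session → Spec_categorize_session session (categorize_session session)

-- ===== LEMMAS AND PROOFS =====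

lemma bLoop_cons (a : List (String × String)) (rest : List (List (String × String)))
    (n : Int) (iter : Bool) (seen : PySem.Set String) (opp : Bool)
    (types : PySem.Set String) (prev : String) (unsys : Bool) :
    bLoop (a :: rest) n iter seen opp types prev unsys =
      bLoop rest (bTermStep a n iter).1 (bTermStep a n iter).2
        (bDocStep a seen opp).1 (bDocStep a seen opp).2
        (PySem.Set.add types (pvGetS a "action_type")) (pvGetS a "action_type")
        (if prev ≠ "" ∧ pvGetS a "action_type" ≠ prev then true else unsys) := rfl

lemma bLoop_iter (acts : List (List (String × String))) :
    ∀ (terms : List String) (iter : Bool) seen opp types prev unsys,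
      (bLoop acts (terms.length : Int) iter seen opp types prev unsys).2.1 =
        (aSearchLoop acts (terms, iter)).2 := by
  induction acts with
  | nil => intro terms iter seen opp types prev unsys; simp [bLoop, aSearchLoop]
  | cons a rest ih =>
    intro terms iter seen opp types prev unsys
    rw [bLoop_cons]
    by_cases h : pvGetS a "action_type" = "extraction" ∧
        PySem.Str.startswith (pvGetS a "action_label") "searchterm" = true
    · have ht : bTermStep a (terms.length : Int) iter =
          ((terms.length : Int) + 1, if (terms.length : Int) + 1 > 1 then true else iter) := by
        unfold bTermStep; rw [if_pos h]
      have ha : aSearchLoop (a :: rest) (terms, iter) =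
          aSearchLoop rest (terms ++ [pvGetS a "params"],
            if (terms ++ [pvGetS a "params"]).length > 1 then true else iter) := by
        simp only [aSearchLoop]; rw [if_pos h]
      have hn : (terms.length : Int) + 1 = ((terms ++ [pvGetS a "params"]).length : Int) := by
        simp
      have hif : (if ((terms ++ [pvGetS a "params"]).length : Int) > 1 then true else iter) =
          (if (terms ++ [pvGetS a "params"]).length > 1 then true else iter) := by
        refine if_congr ?_ rfl rfl
        omega
      rw [ht, ha]
      rw [show ((((terms.length : Int) + 1, if (terms.length : Int) + 1 > 1 then true else iter) : Int × Bool).1) = (terms.length : Int) + 1 from rfl,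
          show ((((terms.length : Int) + 1, if (terms.length : Int) + 1 > 1 then true else iter) : Int × Bool).2) = (if (terms.length : Int) + 1 > 1 then true else iter) from rfl]
      rw [hn]
      rw [hif]
      exact ih (terms ++ [pvGetS a "params"]) _ _ _ _ _ _
    · have ht : bTermStep a (terms.length : Int) iter = ((terms.length : Int), iter) := by
        unfold bTermStep; rw [if_neg h]
      have ha : aSearchLoop (a :: rest) (terms, iter) = aSearchLoop rest (terms, iter) := by
        simp only [aSearchLoop]; rw [if_neg h]
      rw [ht, ha]
      exact ih terms iter _ _ _ _ _

lemma bLoop_opp (acts : List (List (String × String))) :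
    ∀ n iter (seen : PySem.Set String) (opp : Bool) types prev unsys,
      (bLoop acts n iter seen opp types prev unsys).2.2.2.1 =
        (aDocLoop acts (seen, opp)).2 := by
  induction acts with
  | nil => intro n iter seen opp types prev unsys; simp [bLoop, aDocLoop]
  | cons a rest ih =>
    intro n iter seen opp types prev unsys
    rw [bLoop_cons]
    by_cases h : pvGetS a "action_type" = "extraction" ∧ pvGetS a "action_label" = "docid"
    · by_cases hm : pvGetS a "params" ∈ seen
      · have hd : bDocStep a seen opp = (seen, true) := by
          unfold bDocStep; rw [if_pos h, if_pos hm]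
        have ha : aDocLoop (a :: rest) (seen, opp) = aDocLoop rest (seen, true) := by
          simp only [aDocLoop]; rw [if_pos h, if_neg (not_not_intro hm)]
        rw [hd, ha]
        exact ih _ _ seen true _ _ _
      · have hd : bDocStep a seen opp = (PySem.Set.add seen (pvGetS a "params"), opp) := by
          unfold bDocStep; rw [if_pos h, if_neg hm]
        have ha : aDocLoop (a :: rest) (seen, opp) =
            aDocLoop rest (PySem.Set.add seen (pvGetS a "params"), opp) := by
          simp only [aDocLoop]; rw [if_pos h, if_pos hm]
        rw [hd, ha]
        exact ih _ _ _ opp _ _ _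
    · have hd : bDocStep a seen opp = (seen, opp) := by
        unfold bDocStep; rw [if_neg h]
      have ha : aDocLoop (a :: rest) (seen, opp) = aDocLoop rest (seen, opp) := by
        simp only [aDocLoop]; rw [if_neg h]
      rw [hd, ha]
      exact ih _ _ seen opp _ _ _

lemma bLoop_types (acts : List (List (String × String))) :
    ∀ n iter seen opp (types : PySem.Set String) prev unsys,
      (bLoop acts n iter seen opp types prev unsys).2.2.2.2.1 =
        acts.foldl (fun s a => PySem.Set.add s (pvGetS a "action_type")) types := by
  induction acts with
  | nil => intro n iter seen opp types prev unsys; simp [bLoop]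
  | cons a rest ih =>
    intro n iter seen opp types prev unsys
    rw [bLoop_cons, List.foldl_cons]
    exact ih _ _ _ _ _ _ _

lemma bLoop_unsys (acts : List (List (String × String))) :
    ∀ n iter seen opp types (prev : String) (unsys : Bool),
      (bLoop acts n iter seen opp types prev unsys).2.2.2.2.2.2 =
        (unsys || aUnsysLoop acts prev) := by
  induction acts with
  | nil => intro n iter seen opp types prev unsys; simp [bLoop, aUnsysLoop]
  | cons a rest ih =>
    intro n iter seen opp types prev unsys
    rw [bLoop_cons, ih]
    by_cases hc : prev ≠ "" ∧ pvGetS a "action_type" ≠ prev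
    · rw [if_pos hc]
      have ha : aUnsysLoop (a :: rest) prev = true := by
        simp only [aUnsysLoop]; rw [if_pos hc]
      rw [ha]
      simp
    · rw [if_neg hc]
      have ha : aUnsysLoop (a :: rest) prev = aUnsysLoop rest (pvGetS a "action_type") := by
        simp only [aUnsysLoop]; rw [if_neg hc]
      rw [ha]

-- ===== VERDICT (by name: the statement is the Claim_ definition above) =====
theorem categorize_session_spec : Claim_equal_categorize_session := by
  unfold Claim_equal_categorize_session
  intro session _ _
  unfold Spec_categorize_session categorize_session categorize_session_alt
  have h1 := bLoop_iter (((PySem.Dict.mk session).get? "actions").getD []) [] false [] false [] "" false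
  have h2 := bLoop_opp (((PySem.Dict.mk session).get? "actions").getD []) 0 false [] false [] "" false
  have h3 := bLoop_types (((PySem.Dict.mk session).get? "actions").getD []) 0 false [] false [] "" false
  have h4 := bLoop_unsys (((PySem.Dict.mk session).get? "actions").getD []) 0 false [] false [] "" false
  simp only [List.length_nil, Nat.cast_zero] at h1
  simp only [h1, h2, h3, h4, Bool.false_or, PySem.Set.ofList_eq_foldl, List.foldl_map]
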